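-- pv_equiv track=rewrite | github.com/saurshaz/analytics-and-databases | duckdb-etl-with-multi-writer/src/query_optimizer.py | _discover_column_name
-- ===== SOURCE A (Python) =====
-- from typing import Optional, List, Dict, Any
--
-- def _discover_column_name(
--
--     desired_name: str,
--     available_cols: List[str]
-- ) -> Optional[str]:
--     """
--     Find actual column name matching desired name
--
--     Handles common variations:
--     - tpep_pickup_datetime -> pickup_datetime
--     - Direct matches
--     - Partial matches by suffix
--     """
--     if desired_name in available_cols:
--         return desired_name
--
--     # Try tpep_ prefix
--     if f"tpep_{desired_name}" in available_cols:
--         return f"tpep_{desired_name}"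
--
--     # Try suffix matching
--     for col in available_cols:
--         if col.endswith(desired_name) or col.endswith(f"_{desired_name}"):
--             return col
--
--     # Try case-insensitive
--     desired_lower = desired_name.lower()
--     for col in available_cols:
--         if col.lower() == desired_lower:
--             return col
--
--     return None
-- ===== SOURCE B (Python) =====
-- def _discover_column_name(desired_name, available_cols):
--     """Single pass: record the best candidate for each precedence tier."""
--     has_exact = False
--     has_tpep = False
--     first_suffix = None
--     first_ci = None
--     tpep = "tpep_" + desired_name
--     desired_lower = desired_name.lower()
--     for col in available_cols:
--         if col == desired_name:
--             has_exact = True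
--         if col == tpep:
--             has_tpep = True
--         if first_suffix is None and (col.endswith(desired_name) or col.endswith("_" + desired_name)):
--             first_suffix = col
--         if first_ci is None and col.lower() == desired_lower:
--             first_ci = col
--     if has_exact:
--         return desired_name
--     if has_tpep:
--         return tpep
--     if first_suffix is not None:
--         return first_suffix
--     return first_ci
-- ===== Notes on version B (the rewrite author's own statement) =====
-- stated objective: alternative
-- what changed: Replaces A's four sequential scans (two membership tests and two search loops) with one pass over available_cols that records per-tier candidates (exact flag, tpep flag, first suffix match, first case-insensitive match) and selects by precedence afterwards.
import Mathlib
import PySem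

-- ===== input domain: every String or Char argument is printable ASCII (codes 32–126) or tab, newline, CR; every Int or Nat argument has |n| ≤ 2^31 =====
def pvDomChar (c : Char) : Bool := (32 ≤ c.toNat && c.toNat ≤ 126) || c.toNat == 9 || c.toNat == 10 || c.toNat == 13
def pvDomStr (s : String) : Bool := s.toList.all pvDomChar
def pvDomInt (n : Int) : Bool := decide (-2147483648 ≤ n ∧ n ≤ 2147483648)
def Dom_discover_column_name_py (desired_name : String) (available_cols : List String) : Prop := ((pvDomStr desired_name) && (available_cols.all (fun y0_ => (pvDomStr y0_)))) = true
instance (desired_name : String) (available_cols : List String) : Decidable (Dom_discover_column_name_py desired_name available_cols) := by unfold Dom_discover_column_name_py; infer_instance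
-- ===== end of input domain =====

-- ===== PORT A =====
-- One honest line: B replaces A's four sequential scans by a single pass recording per-tier
-- candidates; same cost, different decomposition (objective: alternative).

-- A's third block: "for col in available_cols: if col.endswith(...): return col"
def pvAFindSuffix (d : String) : List String → Option String
  | [] => none
  | c :: rest =>
    if PySem.Str.endswith c d || PySem.Str.endswith c ("_" ++ d) then some c
    else pvAFindSuffix d rest

-- A's fourth block: "for col in available_cols: if col.lower() == desired_lower: return col"
def pvAFindCI (dl : String) : List String → Option String
  | [] => none
  | c :: rest =>
    if PySem.Str.lower c == dl then some c
    else pvAFindCI dl rest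

def discover_column_name_py (desired_name : String) (available_cols : List String) : Option String :=
  if available_cols.contains desired_name then some desired_name
  else if available_cols.contains ("tpep_" ++ desired_name) then some ("tpep_" ++ desired_name)
  else
    match pvAFindSuffix desired_name available_cols with
    | some c => some c
    | none =>
      match pvAFindCI (PySem.Str.lower desired_name) available_cols with
      | some c => some c
      | none => none

-- ===== PORT B =====
-- single-pass state: (has_exact, has_tpep, first_suffix, first_ci)
def pvBStep (d tpep dl : String) (s : Bool × Bool × Option String × Option String) (c : String) :
    Bool × Bool × Option String × Option String :=
  ( s.1 || c == d,
    s.2.1 || c == tpep,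
    (match s.2.2.1 with
     | some x => some x
     | none => if PySem.Str.endswith c d || PySem.Str.endswith c ("_" ++ d) then some c else none),
    (match s.2.2.2 with
     | some x => some x
     | none => if PySem.Str.lower c == dl then some c else none) )

def discover_column_name_py_alt (desired_name : String) (available_cols : List String) : Option String :=
  let tpep := "tpep_" ++ desired_name
  let dl := PySem.Str.lower desired_name
  let st := available_cols.foldl (pvBStep desired_name tpep dl) (false, false, none, none)
  if st.1 then some desired_name
  else if st.2.1 then some tpep
  else
    match st.2.2.1 with
    | some x => some x
    | none => st.2.2.2

-- ===== PRECONDITION & SPEC =====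
def Spec_discover_column_name_py (desired_name : String) (available_cols : List String) (out : Option String) : Prop := out = discover_column_name_py_alt desired_name available_cols
instance (desired_name : String) (available_cols : List String) (out : Option String) : Decidable (Spec_discover_column_name_py desired_name available_cols out) := by unfold Spec_discover_column_name_py; infer_instance

-- ===== CLAIM =====
def Claim_equal_discover_column_name_py : Prop := ∀ (desired_name : String) (available_cols : List String), Dom_discover_column_name_py desired_name available_cols → Spec_discover_column_name_py desired_name available_cols (discover_column_name_py desired_name available_cols)

-- ===== LEMMAS AND PROOFS =====

-- the fold computes, componentwise, exactly A's four scans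
theorem pvB_fold_char (d tpep dl : String) (cols : List String)
    (e t : Bool) (s c : Option String) :
    cols.foldl (pvBStep d tpep dl) (e, t, s, c) =
      ( e || cols.contains d,
        t || cols.contains tpep,
        (match s with | some x => some x | none => pvAFindSuffix d cols),
        (match c with | some x => some x | none => pvAFindCI dl cols) ) := by
  induction cols generalizing e t s c with
  | nil => cases s <;> cases c <;> simp [pvAFindSuffix, pvAFindCI]
  | cons h rest ih =>
    simp only [List.foldl_cons, ih, pvBStep, List.contains_cons]
    cases s <;> cases c <;>
      simp [pvAFindSuffix, pvAFindCI, Bool.or_assoc, Bool.beq_comm] <;>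
      split_ifs <;> simp

-- ===== VERDICT =====
theorem discover_column_name_py_spec : Claim_equal_discover_column_name_py := by
  intro d cols _
  unfold Spec_discover_column_name_py discover_column_name_py discover_column_name_py_alt
  simp only [pvB_fold_char, Bool.false_or]
  by_cases h1 : cols.contains d <;> by_cases h2 : cols.contains ("tpep_" ++ d) <;>
    simp [h1, h2] <;> try rfl
  all_goals
    cases pvAFindSuffix d cols <;> cases pvAFindCI (PySem.Str.lower d) cols <;> simp
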